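-- pv_equiv track=rewrite | github.com/baekjs0123/SWEA | 0319_그래프/24220. 경로의 수.py | dfs
-- ===== SOURCE A (Python) =====
-- def dfs(graph, current, goal, visited):
--     """
--     깊이 우선 탐색(DFS)을 사용하여 현재 정점에서 목표 정점까지의 모든 경로를 찾습니다.
--
--     :param graph: 그래프를 나타내는 인접 리스트
--     :param current: 현재 정점
--     :param goal: 목표 정점
--     :param visited: 방문한 정점을 추적하는 리스트
--     :return: 경로의 수
--     """
--     # 현재 정점을 방문 처리합니다.
--     visited[current] = True
--
--     # 현재 정점이 목표 정점과 같다면 경로를 찾은 것이므로 1을 반환합니다.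
--     if current == goal:
--         visited[current] = False
--         return 1
--
--     # 경로의 수를 저장할 변수를 초기화합니다.
--     path_count = 0
--
--     # 현재 정점에 인접한 모든 정점을 탐색합니다.
--     for neighbor in graph[current]:
--         # 인접한 정점을 아직 방문하지 않았다면 재귀적으로 DFS를 수행합니다.
--         if not visited[neighbor]:
--             path_count += dfs(graph, neighbor, goal, visited)
--
--     # 현재 정점의 방문을 해제하여 다른 경로에서 방문할 수 있도록 합니다.
--     visited[current] = False
--
--     return path_count
-- ===== SOURCE B (Python) =====
-- def dfs(graph, current, goal, visited):
--     # Iterative worklist version: each stack entry carries the vertex together with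
--     # its own copy of the visited flags, so no backtracking/unmarking is needed.
--     # Same return value as the recursive version; does not mutate `visited`.
--     if current == goal:
--         return 1
--     start = list(visited)
--     start[current] = True
--     count = 0
--     stack = [(current, start)]
--     while stack:
--         v, seen = stack.pop()
--         for nb in graph[v]:
--             if not seen[nb]:
--                 if nb == goal:
--                     count += 1
--                 else:
--                     child = list(seen)
--                     child[nb] = True
--                     stack.append((nb, child))
--     return count
-- ===== Notes on version B (the rewrite author's own statement) =====
-- stated objective: alternative
-- what changed: Recursive backtracking DFS (mark, recurse, unmark on a shared visited list) is replaced by an iterative explicit-stack worklist of independent (vertex, visited-copy) states, so there is no recursion and no unmarking; B also leaves the caller's visited list untouched while A may flip visited[current] when it was seeded True.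
-- outside the precondition, e.g. on dfs([[], [5]], 0, 1, [False, False]): A returns 0, B returns 0
import Mathlib
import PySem

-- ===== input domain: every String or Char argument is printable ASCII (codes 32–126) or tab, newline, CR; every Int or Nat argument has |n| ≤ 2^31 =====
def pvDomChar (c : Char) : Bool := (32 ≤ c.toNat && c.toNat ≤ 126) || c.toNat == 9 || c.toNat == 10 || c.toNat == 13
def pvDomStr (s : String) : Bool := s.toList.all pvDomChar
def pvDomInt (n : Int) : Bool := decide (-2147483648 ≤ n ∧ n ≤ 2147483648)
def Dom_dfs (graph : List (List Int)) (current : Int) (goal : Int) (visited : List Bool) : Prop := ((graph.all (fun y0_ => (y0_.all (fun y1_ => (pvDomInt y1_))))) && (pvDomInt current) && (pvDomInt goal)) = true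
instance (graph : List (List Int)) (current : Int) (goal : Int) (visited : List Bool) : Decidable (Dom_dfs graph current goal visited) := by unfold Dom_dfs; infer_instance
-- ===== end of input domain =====

-- B replaces A's recursive backtracking DFS by an iterative explicit-stack worklist of
-- independent (vertex, visited-copy) states (objective: alternative, not faster).
-- Equivalence is about the RETURN value: A mutates `visited` in place (net effect: it can
-- flip visited[current] to False when it was seeded True); B never mutates the argument.

-- ===== PORT A =====
-- Python list indexing l[i] for an in-range index (negative i counts from the end);
-- exact whenever -len(l) <= i < len(l), which Pre_dfs guarantees for every access.
def pyIdx (n : Nat) (i : Int) : Nat := (if i < 0 then i + n else i).toNat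

-- Python A recurses without bound; the port carries a fuel argument (visited.length + 1
-- suffices under Pre_dfs, where every recursive call marks a fresh unvisited vertex).
mutual
def dfsA (graph : List (List Int)) (goal : Int) : Nat → Int → List Bool → Int × List Bool
  | 0, _, vis => (0, vis)
  | f+1, current, vis =>
      let vis1 := vis.set (pyIdx vis.length current) true   -- visited[current] = True
      if current = goal then (1, vis1.set (pyIdx vis.length current) false)
      else
        let r := loopA graph goal f (graph.getD (pyIdx graph.length current) []) vis1
        (r.1, r.2.set (pyIdx vis.length current) false)     -- visited[current] = False
  termination_by f _ _ => (f, 0)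

def loopA (graph : List (List Int)) (goal : Int) : Nat → List Int → List Bool → Int × List Bool
  | _, [], vis => (0, vis)
  | f, nb :: rest, vis =>
      if vis.getD (pyIdx vis.length nb) false then loopA graph goal f rest vis
      else
        let r := dfsA graph goal f nb vis
        let r2 := loopA graph goal f rest r.2
        (r.1 + r2.1, r2.2)
  termination_by f l _ => (f, l.length + 1)
end

def dfs (graph : List (List Int)) (current : Int) (goal : Int) (visited : List Bool) : Int :=
  (dfsA graph goal (visited.length + 1) current visited).1

-- ===== PORT B =====
-- One step of Source B's inner `for nb in graph[v]` loop: skip seen vertices, count the goal,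
-- otherwise push (nb, copy-of-seen-with-nb-marked).  Prepending = python append + LIFO pop.
def stepB (goal : Int) (seen : List Bool)
    (acc : List (Int × List Bool) × Int) (nb : Int) : List (Int × List Bool) × Int :=
  if seen.getD (pyIdx seen.length nb) false then acc
  else if nb = goal then (acc.1, acc.2 + 1)
  else ((nb, seen.set (pyIdx seen.length nb) true) :: acc.1, acc.2)

-- Source B's `while stack` loop; one fuel unit per pop (the fuel in dfs_alt always suffices
-- under Pre_dfs — proved below — since the machine pops at most (E+2)^(n+1) frames).
def runAlt (graph : List (List Int)) (goal : Int) : Nat → List (Int × List Bool) → Int → Int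
  | 0, _, count => count
  | _+1, [], count => count
  | f+1, (v, seen) :: stack, count =>
      let r := (graph.getD (pyIdx graph.length v) []).foldl (stepB goal seen) ([], count)
      runAlt graph goal f (r.1 ++ stack) r.2

def dfs_alt (graph : List (List Int)) (current : Int) (goal : Int) (visited : List Bool) : Int :=
  if current = goal then 1
  else
    runAlt graph goal (((graph.map List.length).sum + 2) ^ (graph.length + 1) + 1)
      [(current, visited.set (pyIdx visited.length current) true)] 0

-- ===== PRECONDITION & SPEC =====
-- Pre_dfs = the inputs on which Python A returns normally: the start vertex is a valid
-- (possibly negative) index into visited, and — unless current == goal, where A returns 1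
-- immediately — visited is as long as graph and every listed neighbour is a valid index.
-- (Inputs where A raises IndexError, and the residual cases where A returns only because
-- an out-of-range row is never reached, lie outside; see claim.json cites.)
def Pre_dfs (graph : List (List Int)) (current : Int) (goal : Int) (visited : List Bool) : Prop :=
  (-(visited.length : Int) ≤ current ∧ current < (visited.length : Int)) ∧
  (current = goal ∨
    (visited.length = graph.length ∧
     ∀ row ∈ graph, ∀ x ∈ row, -(visited.length : Int) ≤ x ∧ x < (visited.length : Int)))
instance (graph : List (List Int)) (current : Int) (goal : Int) (visited : List Bool) : Decidable (Pre_dfs graph current goal visited) := by unfold Pre_dfs; infer_instance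

def pvWitness_dfs : List (List Int) × Int × Int × List Bool := ([[1, 2], [2], []], 0, 2, [false, false, false])

def Spec_dfs (graph : List (List Int)) (current : Int) (goal : Int) (visited : List Bool) (out : Int) : Prop := out = dfs_alt graph current goal visited
instance (graph : List (List Int)) (current : Int) (goal : Int) (visited : List Bool) (out : Int) : Decidable (Spec_dfs graph current goal visited out) := by unfold Spec_dfs; infer_instance

-- ===== CLAIM (what is proved, stated in full; the proofs are below) =====
def Claim_equal_dfs : Prop := ∀ (graph : List (List Int)) (current : Int) (goal : Int) (visited : List Bool), Dom_dfs graph current goal visited → Pre_dfs graph current goal visited → Spec_dfs graph current goal visited (dfs graph current goal visited)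

-- ===== LEMMAS AND PROOFS =====

-- Size of B's search tree, mirroring A's recursion (number of frames the machine pops).
mutual
def szD (graph : List (List Int)) (goal : Int) : Nat → Int → List Bool → Nat
  | 0, _, _ => 0
  | f+1, v, s =>
      if v = goal then 0
      else 1 + szL graph goal f (graph.getD (pyIdx graph.length v) []) (s.set (pyIdx s.length v) true)
  termination_by f _ _ => (f, 0)

def szL (graph : List (List Int)) (goal : Int) : Nat → List Int → List Bool → Nat
  | _, [], _ => 0
  | f, nb :: rest, s =>
      if s.getD (pyIdx s.length nb) false then szL graph goal f rest s
      else szD graph goal f nb s + szL graph goal f rest s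
  termination_by f l _ => (f, l.length + 1)
end

lemma pyIdx_lt {n : Nat} {x : Int} (h1 : -(n : Int) ≤ x) (h2 : x < (n : Int)) :
    pyIdx n x < n := by
  unfold pyIdx
  split <;> omega

lemma set_false_self {s : List Bool} {k : Nat} (h : s.getD k false = false) :
    s.set k false = s := by
  apply List.ext_getElem (by simp)
  intro i hi hi'
  rw [List.getElem_set]
  split
  · next he =>
    subst he
    rw [List.getD_eq_getElem s false hi'] at h
    exact h.symm
  · rfl

lemma set_set_false {s : List Bool} {k : Nat} (h : s.getD k false = false) :
    (s.set k true).set k false = s := by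
  rw [List.set_set]; exact set_false_self h

lemma set_true_self {s : List Bool} {k : Nat} (h : s.getD k false = true) :
    s.set k true = s := by
  have hk : k < s.length := by
    by_contra hk
    rw [List.getD_eq_default] at h
    · exact Bool.false_ne_true h
    · omega
  apply List.ext_getElem (by simp)
  intro i hi hi'
  rw [List.getElem_set]
  split
  · next he => subst he; rw [← List.getD_eq_getElem s false hi'] at *; exact h.symm
  · rfl

lemma count_set_true {s : List Bool} {k : Nat} (hk : k < s.length)
    (h : s.getD k false = false) :
    (s.set k true).count false + 1 = s.count false := by
  induction s generalizing k with
  | nil => simp at hk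
  | cons b t ih =>
    cases k with
    | zero =>
      simp [List.getD] at h
      subst h
      simp only [List.set]
      rw [List.count_cons, List.count_cons]
      simp
    | succ k =>
      simp at hk
      simp [List.getD] at h
      have := ih hk h
      simp only [List.set]
      rw [List.count_cons, List.count_cons]
      omega

lemma count_false_lt_of_true {s : List Bool} {k : Nat} (hk : k < s.length)
    (h : s.getD k false = true) : s.count false < s.length := by
  have hgk : s[k] = true := by rw [← List.getD_eq_getElem s false hk]; exact h
  have hmem : true ∈ s := hgk ▸ List.getElem_mem hk
  simp only [List.count_lt_length_iff]
  exact ⟨true, hmem, by simp⟩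

lemma count_false_pos {s : List Bool} {k : Nat} (hk : k < s.length)
    (h : s.getD k false = false) : 0 < s.count false := by
  have hgk : s[k] = false := by rw [← List.getD_eq_getElem s false hk]; exact h
  have hmem : false ∈ s := hgk ▸ List.getElem_mem hk
  simpa [List.count_pos_iff] using hmem

-- A restores the visited list: after a recursive call on an unvisited vertex the
-- threaded list is exactly what it was before the call.
lemma loopA_restore_of {graph : List (List Int)} {goal : Int} {f : Nat}
    (hd : ∀ v s, s.getD (pyIdx s.length v) false = false → (dfsA graph goal f v s).2 = s) :
    ∀ l s, (loopA graph goal f l s).2 = s := by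
  intro l
  induction l with
  | nil => intro s; simp [loopA]
  | cons nb rest ih =>
    intro s
    rw [loopA]
    split
    · exact ih s
    · next hnb =>
      simp only
      rw [hd nb s (by simpa using hnb), ih s]

lemma dfsA_restore {graph : List (List Int)} {goal : Int} :
    ∀ f v s, s.getD (pyIdx s.length v) false = false → (dfsA graph goal f v s).2 = s := by
  intro f
  induction f with
  | zero => intro v s _; simp [dfsA]
  | succ f ih =>
    intro v s h
    rw [dfsA]
    split
    · simpa using set_set_false h
    · simp only
      rw [loopA_restore_of ih]
      simpa using set_set_false h

-- every element of the row read for any vertex normalizes to an in-range index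
lemma row_ok {graph : List (List Int)}
    (hg : ∀ row ∈ graph, ∀ x ∈ row, pyIdx graph.length x < graph.length)
    (k : Nat) : ∀ x ∈ graph.getD k [], pyIdx graph.length x < graph.length := by
  by_cases hk : k < graph.length
  · rw [List.getD_eq_getElem _ _ hk]
    exact hg _ (List.getElem_mem hk)
  · rw [List.getD_eq_default _ _ (by omega)]
    simp

lemma row_len_le {graph : List (List Int)} (k : Nat) :
    (graph.getD k []).length ≤ (graph.map List.length).sum := by
  by_cases hk : k < graph.length
  · rw [List.getD_eq_getElem _ _ hk]
    exact List.le_sum_of_mem (List.mem_map_of_mem (List.getElem_mem hk))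
  · rw [List.getD_eq_default _ _ (by omega)]
    simp

-- equation helpers for the WF-recursive ports
lemma stepB_skip {goal nb : Int} {seen : List Bool}
    (h : seen.getD (pyIdx seen.length nb) false = true)
    (acc : List (Int × List Bool) × Int) : stepB goal seen acc nb = acc := by
  simp only [stepB]
  rw [h]
  simp

lemma stepB_goal {goal : Int} {seen : List Bool}
    (h : seen.getD (pyIdx seen.length goal) false = false)
    (acc : List (Int × List Bool) × Int) : stepB goal seen acc goal = (acc.1, acc.2 + 1) := by
  simp only [stepB]
  rw [h]
  simp

lemma stepB_push {goal nb : Int} {seen : List Bool}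
    (h : seen.getD (pyIdx seen.length nb) false = false)
    (hng : nb ≠ goal) (acc : List (Int × List Bool) × Int) :
    stepB goal seen acc nb = ((nb, seen.set (pyIdx seen.length nb) true) :: acc.1, acc.2) := by
  simp only [stepB]
  rw [h]
  simp [hng]

lemma szL_nil {graph : List (List Int)} {goal : Int} {f : Nat} {s : List Bool} :
    szL graph goal f [] s = 0 := by rw [szL]

lemma loopA_nil {graph : List (List Int)} {goal : Int} {f : Nat} {vis : List Bool} :
    loopA graph goal f [] vis = (0, vis) := by rw [loopA]

lemma szL_cons_skip {graph : List (List Int)} {goal nb : Int} {f : Nat} {rest : List Int}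
    {s : List Bool} (h : s.getD (pyIdx s.length nb) false = true) :
    szL graph goal f (nb :: rest) s = szL graph goal f rest s := by
  rw [szL]
  rw [h]
  simp

lemma szL_cons_fresh {graph : List (List Int)} {goal nb : Int} {f : Nat} {rest : List Int}
    {s : List Bool} (h : s.getD (pyIdx s.length nb) false = false) :
    szL graph goal f (nb :: rest) s = szD graph goal f nb s + szL graph goal f rest s := by
  rw [szL]
  rw [h]
  simp

lemma szD_succ {graph : List (List Int)} {goal v : Int} {f : Nat} {s : List Bool} :
    szD graph goal (f+1) v s
      = if v = goal then 0
        else 1 + szL graph goal f (graph.getD (pyIdx graph.length v) [])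
          (s.set (pyIdx s.length v) true) := by
  rw [szD]

lemma loopA_cons_skip {graph : List (List Int)} {goal nb : Int} {f : Nat} {rest : List Int}
    {vis : List Bool} (h : vis.getD (pyIdx vis.length nb) false = true) :
    loopA graph goal f (nb :: rest) vis = loopA graph goal f rest vis := by
  rw [loopA]
  rw [h]
  simp

lemma loopA_cons_fresh {graph : List (List Int)} {goal nb : Int} {f : Nat} {rest : List Int}
    {vis : List Bool} (h : vis.getD (pyIdx vis.length nb) false = false) :
    loopA graph goal f (nb :: rest) vis
      = ((dfsA graph goal f nb vis).1
            + (loopA graph goal f rest (dfsA graph goal f nb vis).2).1,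
         (loopA graph goal f rest (dfsA graph goal f nb vis).2).2) := by
  rw [loopA]
  rw [h]
  simp

lemma dfsA_succ_goal {graph : List (List Int)} {goal : Int} {f : Nat} {s : List Bool}
    (h : s.getD (pyIdx s.length goal) false = false) : dfsA graph goal (f+1) goal s = (1, s) := by
  rw [dfsA]
  simp [set_set_false h]

lemma dfsA_succ_fresh {graph : List (List Int)} {goal v : Int} {f : Nat} {s : List Bool}
    (hng : v ≠ goal) (h : s.getD (pyIdx s.length v) false = false) :
    dfsA graph goal (f+1) v s
      = ((loopA graph goal f (graph.getD (pyIdx graph.length v) [])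
            (s.set (pyIdx s.length v) true)).1, s) := by
  rw [dfsA]
  have hrest := loopA_restore_of (graph := graph) (goal := goal) (f := f)
    (fun v t ht => dfsA_restore (graph := graph) (goal := goal) f v t ht)
    (graph.getD (pyIdx graph.length v) []) (s.set (pyIdx s.length v) true)
  simp only [List.getD_eq_getElem?_getD] at hrest
  simp [hng, hrest, set_set_false h]

-- THE SIMULATION LEMMA: popping one frame (w, s) — the machine then fully explores its
-- subtree — consumes exactly 1 + szL fuel and adds exactly A's loop count for row(w).
lemma pop_lemma {graph : List (List Int)} {goal : Int}
    (hg : ∀ row ∈ graph, ∀ x ∈ row, pyIdx graph.length x < graph.length) :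
    ∀ f : Nat, ∀ (w : Int) (s : List Bool), s.length = graph.length → s.count false < f →
    ∀ g rest c,
      runAlt graph goal
          (g + (1 + szL graph goal f (graph.getD (pyIdx graph.length w) []) s)) ((w, s) :: rest) c
        = runAlt graph goal g rest
            (c + (loopA graph goal f (graph.getD (pyIdx graph.length w) []) s).1) := by
  intro f
  induction f with
  | zero => intro w s _ hcf; exact absurd hcf (Nat.not_lt_zero _)
  | succ f ih =>
    -- consume a whole stack segment of good frames (uses ih for each frame)
    have consume : ∀ (M : List (Int × List Bool)),
        (∀ m ∈ M, m.2.length = graph.length ∧ m.2.count false < f) →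
        ∀ g rest c,
          runAlt graph goal
              (g + (M.map (fun m =>
                1 + szL graph goal f (graph.getD (pyIdx graph.length m.1) []) m.2)).sum)
              (M ++ rest) c
            = runAlt graph goal g rest
                (c + (M.map (fun m =>
                  (loopA graph goal f (graph.getD (pyIdx graph.length m.1) []) m.2).1)).sum) := by
      intro M
      induction M with
      | nil => intro _ g rest c; simp
      | cons m M ihM =>
        intro hM g rest c
        obtain ⟨hm1, hm2⟩ := hM m (by simp)
        have hM' : ∀ m' ∈ M, m'.2.length = graph.length ∧ m'.2.count false < f :=
          fun m' hm' => hM m' (by simp [hm'])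
        simp only [List.map_cons, List.sum_cons, List.cons_append]
        have harith : g + (1 + szL graph goal f (graph.getD (pyIdx graph.length m.1) []) m.2 +
            (M.map (fun m =>
              1 + szL graph goal f (graph.getD (pyIdx graph.length m.1) []) m.2)).sum)
            = (g + (M.map (fun m =>
                1 + szL graph goal f (graph.getD (pyIdx graph.length m.1) []) m.2)).sum)
              + (1 + szL graph goal f (graph.getD (pyIdx graph.length m.1) []) m.2) := by omega
        rw [harith, ih m.1 m.2 hm1 hm2, ihM hM']
        congr 1
        ring
    intro w s hs hcf g rest c
    -- the fold over the row: relate pushed frames / count to A's loop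
    have fold_spec : ∀ (l : List Int), (∀ x ∈ l, pyIdx graph.length x < graph.length) →
        ∀ (P : List (Int × List Bool)) (c0 : Int),
        (∀ m ∈ P, m.2.length = graph.length ∧ m.2.count false < f) →
        (∀ m ∈ (l.foldl (stepB goal s) (P, c0)).1, m.2.length = graph.length ∧ m.2.count false < f) ∧
        ((l.foldl (stepB goal s) (P, c0)).1.map
            (fun m => 1 + szL graph goal f (graph.getD (pyIdx graph.length m.1) []) m.2)).sum
          = (P.map (fun m =>
              1 + szL graph goal f (graph.getD (pyIdx graph.length m.1) []) m.2)).sum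
            + szL graph goal (f+1) l s ∧
        (l.foldl (stepB goal s) (P, c0)).2
            + ((l.foldl (stepB goal s) (P, c0)).1.map
                (fun m => (loopA graph goal f (graph.getD (pyIdx graph.length m.1) []) m.2).1)).sum
          = c0 + (P.map (fun m =>
              (loopA graph goal f (graph.getD (pyIdx graph.length m.1) []) m.2).1)).sum
            + (loopA graph goal (f+1) l s).1 := by
      intro l
      induction l with
      | nil =>
        intro _ P c0 hP
        refine ⟨by simpa using hP, ?_, ?_⟩
        · simp [szL_nil]
        · simp [loopA_nil]
      | cons nb l ihl =>
        intro hl P c0 hP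
        have hnb : pyIdx s.length nb < s.length := by
          rw [hs]
          exact hl nb (by simp)
        have hl' : ∀ x ∈ l, pyIdx graph.length x < graph.length := fun x hx => hl x (by simp [hx])
        by_cases hseen : s.getD (pyIdx s.length nb) false = true
        · -- already visited: the step skips, A's loop skips, nothing is pushed
          rw [List.foldl_cons, stepB_skip hseen, szL_cons_skip hseen, loopA_cons_skip hseen]
          exact ihl hl' P c0 hP
        · have hseen' : s.getD (pyIdx s.length nb) false = false := by
            cases h : s.getD (pyIdx s.length nb) false
            · rfl
            · exact absurd h hseen
          have hpos : 0 < s.count false := count_false_pos hnb hseen'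
          have hf1 : ∃ f', f = f' + 1 := ⟨f - 1, by omega⟩
          obtain ⟨f', hf'⟩ := hf1
          by_cases hgoal : nb = goal
          · -- goal hit: B counts it in place; A's recursive call returns 1 and restores
            subst hgoal
            rw [List.foldl_cons, stepB_goal hseen']
            obtain ⟨h1, h2, h3⟩ := ihl hl' P (c0 + 1) hP
            refine ⟨h1, ?_, ?_⟩
            · rw [h2, szL_cons_fresh hseen', hf', szD_succ, if_pos rfl]
              omega
            · rw [h3, loopA_cons_fresh hseen', hf', dfsA_succ_goal hseen']
              dsimp only
              rw [← hf']
              ring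
          · -- fresh non-goal vertex: B pushes a frame; A recurses and restores
            rw [List.foldl_cons, stepB_push hseen' hgoal]
            have hs'len : (s.set (pyIdx s.length nb) true).length = graph.length := by
              simp [hs]
            have hs'cnt : (s.set (pyIdx s.length nb) true).count false < f := by
              have := count_set_true (s := s) (k := pyIdx s.length nb) hnb hseen'
              omega
            have hP' : ∀ m ∈ ((nb, s.set (pyIdx s.length nb) true) :: P),
                m.2.length = graph.length ∧ m.2.count false < f := by
              intro m hm
              rcases List.mem_cons.1 hm with h | h
              · subst h; exact ⟨hs'len, hs'cnt⟩
              · exact hP m h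
            obtain ⟨h1, h2, h3⟩ := ihl hl' ((nb, s.set (pyIdx s.length nb) true) :: P) c0 hP'
            refine ⟨h1, ?_, ?_⟩
            · rw [h2, szL_cons_fresh hseen', hf', szD_succ, if_neg hgoal]
              simp only [List.map_cons, List.sum_cons]
              rw [← hf']
              omega
            · rw [h3, loopA_cons_fresh hseen', hf', dfsA_succ_fresh hgoal hseen']
              dsimp only
              simp only [List.map_cons, List.sum_cons]
              rw [← hf']
              ring
    -- now pop the frame (w, s)
    have hrow' := row_ok hg (pyIdx graph.length w)
    obtain ⟨hOK, hSZ, hVAL⟩ :=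
      fold_spec (graph.getD (pyIdx graph.length w) []) hrow' [] c (by simp)
    have hfuel : g + (1 + szL graph goal (f+1) (graph.getD (pyIdx graph.length w) []) s)
        = (g + (((graph.getD (pyIdx graph.length w) []).foldl (stepB goal s) ([], c)).1.map
            (fun m => 1 + szL graph goal f (graph.getD (pyIdx graph.length m.1) []) m.2)).sum) + 1 := by
      rw [hSZ]; simp; omega
    rw [hfuel]
    rw [runAlt]
    rw [consume _ hOK]
    congr 1
    simp only [List.map_nil, List.sum_nil, Int.add_zero] at hVAL
    omega

-- fuel bound: the search tree has at most (E+2)^f frames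
lemma sz_le {graph : List (List Int)} {goal : Int} :
    ∀ f : Nat, (∀ v s, szD graph goal f v s ≤ ((graph.map List.length).sum + 2) ^ f) ∧
      (∀ l s, szL graph goal f l s ≤ l.length * ((graph.map List.length).sum + 2) ^ f) := by
  intro f
  induction f with
  | zero =>
    constructor
    · intro v s; simp [szD]
    · intro l s
      induction l with
      | nil => simp [szL_nil]
      | cons nb rest ih =>
        rw [szL]
        have h0 : szD graph goal 0 nb s = 0 := by rw [szD]
        split
        · exact le_trans ih (Nat.mul_le_mul_right _ (by simp))
        · rw [h0]
          simp only [pow_zero, Nat.mul_one] at ih ⊢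
          simp only [List.length_cons]
          omega
  | succ f ih =>
    have hD : ∀ v s, szD graph goal (f+1) v s ≤ ((graph.map List.length).sum + 2) ^ (f+1) := by
      intro v s
      rw [szD]
      split
      · positivity
      · have h1 := ih.2 (graph.getD (pyIdx graph.length v) []) (s.set (pyIdx s.length v) true)
        have h2 := row_len_le (graph := graph) (pyIdx graph.length v)
        have h3 : 1 ≤ ((graph.map List.length).sum + 2) ^ f := Nat.one_le_pow _ _ (by omega)
        have : (graph.getD (pyIdx graph.length v) []).length * ((graph.map List.length).sum + 2) ^ f
            ≤ (graph.map List.length).sum * ((graph.map List.length).sum + 2) ^ f :=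
          Nat.mul_le_mul_right _ h2
        calc 1 + szL graph goal f (graph.getD (pyIdx graph.length v) []) (s.set (pyIdx s.length v) true)
            ≤ 1 + (graph.map List.length).sum * ((graph.map List.length).sum + 2) ^ f := by omega
          _ ≤ ((graph.map List.length).sum + 2) ^ (f+1) := by
              rw [pow_succ ((graph.map List.length).sum + 2) f]
              nlinarith
    refine ⟨hD, ?_⟩
    intro l s
    induction l with
    | nil => simp [szL_nil]
    | cons nb rest ihl =>
      rw [szL]
      have h3 : 1 ≤ ((graph.map List.length).sum + 2) ^ (f+1) := Nat.one_le_pow _ _ (by omega)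
      split
      · simp only [List.length_cons]
        nlinarith
      · have := hD nb s
        simp only [List.length_cons]
        nlinarith

lemma runAlt_nil {graph : List (List Int)} {goal : Int} :
    ∀ f c, runAlt graph goal f [] c = c := by
  intro f c
  cases f <;> rw [runAlt]

-- ===== VERDICT (by name: the statement is the Claim_ definition above) =====
theorem dfs_spec : Claim_equal_dfs := by
  intro graph current goal visited _hDom hPre
  obtain ⟨⟨hc1, hc2⟩, hor⟩ := hPre
  unfold Spec_dfs dfs dfs_alt
  by_cases hcg : current = goal
  · rw [dfsA]
    simp [hcg]
  · rcases hor with h | ⟨hlen, hrows⟩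
    · exact absurd h hcg
    have hg : ∀ row ∈ graph, ∀ x ∈ row, pyIdx graph.length x < graph.length := by
      intro row hrow x hx
      obtain ⟨hx1, hx2⟩ := hrows row hrow x hx
      rw [hlen] at hx1 hx2
      exact pyIdx_lt hx1 hx2
    have hcuridx : pyIdx visited.length current < visited.length := pyIdx_lt hc1 hc2
    rw [dfsA]
    simp only [if_neg hcg]
    have hvlen : (visited.set (pyIdx visited.length current) true).length = graph.length := by
      simp [hlen]
    have hcnt : (visited.set (pyIdx visited.length current) true).count false < visited.length := by
      by_cases hv : visited.getD (pyIdx visited.length current) false = true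
      · rw [set_true_self hv]
        exact count_false_lt_of_true hcuridx hv
      · have hv' : visited.getD (pyIdx visited.length current) false = false := by
          cases h : visited.getD (pyIdx visited.length current) false
          · rfl
          · exact absurd h hv
        have h1 := count_set_true (s := visited) (k := pyIdx visited.length current) hcuridx hv'
        have h2 := List.count_le_length (l := visited) (a := false)
        omega
    have hsz : szL graph goal visited.length (graph.getD (pyIdx graph.length current) [])
        (visited.set (pyIdx visited.length current) true)
        ≤ ((graph.map List.length).sum + 2) ^ (graph.length + 1) := by
      have h1 := (sz_le (graph := graph) (goal := goal) visited.length).2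
        (graph.getD (pyIdx graph.length current) [])
        (visited.set (pyIdx visited.length current) true)
      have h2 := row_len_le (graph := graph) (pyIdx graph.length current)
      have h3 : (graph.getD (pyIdx graph.length current) []).length
            * ((graph.map List.length).sum + 2) ^ visited.length
          ≤ (graph.map List.length).sum * ((graph.map List.length).sum + 2) ^ visited.length :=
        Nat.mul_le_mul_right _ h2
      have h4 : (graph.map List.length).sum * ((graph.map List.length).sum + 2) ^ visited.length
          ≤ ((graph.map List.length).sum + 2) ^ (visited.length + 1) := by
        rw [pow_succ]
        nlinarith [Nat.one_le_pow visited.length ((graph.map List.length).sum + 2)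
          (show 0 < (graph.map List.length).sum + 2 by omega)]
      rw [show ((graph.map List.length).sum + 2) ^ (graph.length + 1)
          = ((graph.map List.length).sum + 2) ^ (visited.length + 1) from by rw [hlen]]
      omega
    have hfuel : ((graph.map List.length).sum + 2) ^ (graph.length + 1) + 1
        = (((graph.map List.length).sum + 2) ^ (graph.length + 1)
            - szL graph goal visited.length (graph.getD (pyIdx graph.length current) [])
                (visited.set (pyIdx visited.length current) true))
          + (1 + szL graph goal visited.length (graph.getD (pyIdx graph.length current) [])
                (visited.set (pyIdx visited.length current) true)) := by omega
    rw [hfuel]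
    rw [pop_lemma hg visited.length current (visited.set (pyIdx visited.length current) true)
      hvlen hcnt _ [] 0]
    rw [runAlt_nil]
    simp
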